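-- pv_equiv track=rewrite | github.com/zones-convolution/zones_convolver | garcia_optimal_partitioning/sol_1.py | generate_partition_sequence
-- ===== SOURCE A (Python) =====
-- import math
--
-- def next_power_of_2(x):
--     return 1 if x == 0 else 2 ** math.ceil(math.log2(x))
--
-- def generate_partition_sequence(n):
--     result = []
--
--     for i in range(n):
--         if i == 0:
--             result.append([(1, 1)])
--         else:
--             last_iteration = result[i - 1]
--             j, k = last_iteration[-1]
--
--             if k == j:
--                 result.append(last_iteration + [(next_power_of_2(j + 1), 1)])
--             else:
--                 result.append(last_iteration + [(j, k + 1)])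
--
--     return result
-- ===== SOURCE B (Python) =====
-- import math
--
-- def generate_partition_sequence(n):
--     # Closed-form block structure: the flat tuple stream is an initial unit pair
--     # followed by complete runs (p, 1), (p, 2), ..., (p, p) for each successive
--     # power of two p, so generate it directly by doubling p — no step recurrence
--     # and no next_power_of_2/log calls — then emit the prefixes.
--     tuples = [(1, 1)]
--     p = 2
--     while len(tuples) < n:
--         tuples.extend((p, k) for k in range(1, p + 1))
--         p *= 2
--     tuples = tuples[:n]
--     return [tuples[:i + 1] for i in range(n)]
-- ===== Notes on version B (the rewrite author's own statement) =====
-- stated objective: alternative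
-- what changed: B exploits the closed-form block structure of the tuple stream (an initial unit pair followed by complete runs (p,1)..(p,p) for each successive power of two p): it generates the flat stream directly by doubling p, with no step recurrence, no read-back of the previous result and no next_power_of_2/log calls, then emits the prefixes.
import Mathlib
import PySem

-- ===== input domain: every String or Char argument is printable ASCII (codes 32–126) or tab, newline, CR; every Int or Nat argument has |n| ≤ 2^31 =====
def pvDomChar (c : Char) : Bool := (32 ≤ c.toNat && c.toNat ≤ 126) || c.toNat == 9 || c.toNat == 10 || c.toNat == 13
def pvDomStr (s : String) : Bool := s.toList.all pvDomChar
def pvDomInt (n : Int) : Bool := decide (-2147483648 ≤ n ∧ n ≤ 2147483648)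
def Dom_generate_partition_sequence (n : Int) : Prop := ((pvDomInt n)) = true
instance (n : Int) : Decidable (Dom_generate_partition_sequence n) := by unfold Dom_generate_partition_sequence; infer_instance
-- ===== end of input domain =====

-- B generates the flat tuple stream directly from its closed-form block structure
-- (an initial unit pair, then full runs (p,1)..(p,p) with doubling p) instead of A's
-- per-step recurrence reading back the nested result; return values proved equal for all n.

-- ===== PORT A =====
-- next_power_of_2: `2 ** math.ceil(math.log2(x))`; for integers x ≥ 1 (the only values it is
-- called with here, x = j+1 ≥ 2) ceil(log2 x) = Nat.clog 2 x exactly.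
def next_power_of_2 (x : Int) : Int :=
  if x == 0 then 1 else 2 ^ (Nat.clog 2 x.toNat)

def generate_partition_sequence (n : Int) : List (List (Int × Int)) :=
  (List.range n.toNat).foldl (fun result (i : Nat) =>
    if i == 0 then
      result ++ [[(1, 1)]]
    else
      -- result[i-1] and last_iteration[-1]: always in range, so getD default is never used
      let last_iteration := (PySem.List.pyGet? result ((i : Int) - 1)).getD []
      let jk := (PySem.List.pyGet? last_iteration (-1)).getD (0, 0)
      if jk.2 == jk.1 then
        result ++ [last_iteration ++ [(next_power_of_2 (jk.1 + 1), 1)]]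
      else
        result ++ [last_iteration ++ [(jk.1, jk.2 + 1)]]) []

-- ===== PORT B =====
-- the `while len(tuples) < n` loop, ported as fuel recursion; fuel n.toNat is enough,
-- since every iteration appends p ≥ 2 tuples (the fuel-exhausted branch is never taken)
def pvBuild : Nat → List (Int × Int) → Int → Nat → List (Int × Int)
  | 0, tuples, _, _ => tuples
  | fuel + 1, tuples, p, n =>
    if tuples.length < n then
      pvBuild fuel (tuples ++ (PySem.List.pyRange 1 (p + 1) 1).map (fun k => (p, k))) (p * 2) n
    else tuples

def generate_partition_sequence_alt (n : Int) : List (List (Int × Int)) :=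
  let tuples := pvBuild n.toNat [(1, 1)] 2 n.toNat
  -- tuples[:n] and tuples[:i+1] with nonnegative bounds: exactly List.take
  let cut := tuples.take n.toNat
  (List.range n.toNat).map (fun i => cut.take (i + 1))

-- ===== PRECONDITION & SPEC =====
def Spec_generate_partition_sequence (n : Int) (out : List (List (Int × Int))) : Prop := out = generate_partition_sequence_alt n
instance (n : Int) (out : List (List (Int × Int))) : Decidable (Spec_generate_partition_sequence n out) := by unfold Spec_generate_partition_sequence; infer_instance

-- ===== CLAIM (what is proved, stated in full; the proofs are below) =====
def Claim_equal_generate_partition_sequence : Prop := ∀ (n : Int), Dom_generate_partition_sequence n → Spec_generate_partition_sequence n (generate_partition_sequence n)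

-- ===== LEMMAS AND PROOFS =====

-- A's step function on the flat tuple stream
def pvAltStep (cur : Option (Int × Int)) : Int × Int :=
  match cur with
  | none => (1, 1)
  | some (j, k) => if k == j then (next_power_of_2 (j + 1), 1) else (j, k + 1)

-- reference flat tuple sequence (first m tuples of A's stream)
def pvTups : Nat → List (Int × Int)
  | 0 => []
  | m + 1 => let prev := pvTups m; prev ++ [pvAltStep prev.getLast?]

theorem pvTups_length (m : Nat) : (pvTups m).length = m := by
  induction m with
  | zero => rfl
  | succ m ih => simp [pvTups, ih]

theorem pvTups_take {m n : Nat} (h : m ≤ n) : (pvTups n).take m = pvTups m := by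
  induction n with
  | zero =>
    have : m = 0 := Nat.le_zero.mp h
    subst this; rfl
  | succ n ih =>
    rcases Nat.lt_or_ge m (n + 1) with hlt | hge
    · have hm : m ≤ n := Nat.lt_succ_iff.mp hlt
      rw [pvTups]
      rw [List.take_append_of_le_length (by rw [pvTups_length]; exact hm)]
      exact ih hm
    · have : m = n + 1 := le_antisymm h hge
      subst this
      exact List.take_of_length_le (by rw [pvTups_length])

-- A's fold builds the prefixes of pvTups
theorem pvA_fold (m : Nat) :
    (List.range m).foldl (fun result (i : Nat) =>
      if i == 0 then
        result ++ [[(1, 1)]]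
      else
        let last_iteration := (PySem.List.pyGet? result ((i : Int) - 1)).getD []
        let jk := (PySem.List.pyGet? last_iteration (-1)).getD (0, 0)
        if jk.2 == jk.1 then
          result ++ [last_iteration ++ [(next_power_of_2 (jk.1 + 1), 1)]]
        else
          result ++ [last_iteration ++ [(jk.1, jk.2 + 1)]]) []
    = (List.range m).map (fun i => pvTups (i + 1)) := by
  induction m with
  | zero => rfl
  | succ m ih =>
    rw [List.range_succ, List.foldl_append, ih, List.map_append]
    cases m with
    | zero => simp [pvTups, pvAltStep]
    | succ s =>
      have hne : (s + 1 : Nat) ≠ 0 := by omega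
      simp only [List.foldl_cons, List.foldl_nil, beq_iff_eq, hne, if_false, List.map_cons,
        List.map_nil]
      have hget : PySem.List.pyGet? ((List.range (s+1)).map (fun i => pvTups (i + 1)))
          (((s + 1 : Nat) : Int) - 1) = some (pvTups (s + 1)) := by
        have : (((s + 1 : Nat) : Int) - 1) = ((s : Nat) : Int) := by push_cast; ring
        rw [this, PySem.List.pyGet?_natCast]
        simp
      rw [hget]
      simp only [Option.getD_some]
      rw [PySem.List.pyGet?_neg_one]
      rcases h : (pvTups (s + 1)).getLast? with _ | jk
      · exfalso
        rw [List.getLast?_eq_none_iff] at h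
        have := pvTups_length (s + 1)
        rw [h] at this
        simp at this
      · simp only [Option.getD_some]
        have hstep : pvAltStep (pvTups (s + 1)).getLast? = pvAltStep (some jk) := by rw [h]
        have : pvTups (s + 1 + 1) = pvTups (s+1) ++ [pvAltStep (some jk)] := by
          rw [pvTups]; rw [hstep]
        rw [this]
        rcases jk with ⟨j, k⟩
        simp only [pvAltStep]
        split_ifs with h1 h2 h3
        · rfl
        · simp [beq_iff_eq] at h1 h2; exact absurd h1 h2
        · simp [beq_iff_eq] at h1 h3; exact absurd h3 h1
        · rfl

theorem pv_next_pow (s : Nat) : next_power_of_2 ((2:Int)^s + 1) = (2:Int)^(s+1) := by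
  have hpos : (0:Int) < 2^s := by positivity
  have hne : ((2:Int)^s + 1) ≠ 0 := by omega
  have htn2 : ((2:Int)^s + 1).toNat = 2^s + 1 := by
    have : ((2:Int)^s) = ((2^s : Nat) : Int) := by push_cast; ring
    omega
  have hclog : Nat.clog 2 (2^s + 1) = s + 1 := by
    have h1 : Nat.clog 2 (2^s + 1) ≤ s + 1 :=
      Nat.clog_le_of_le_pow (by rw [pow_succ]; have := Nat.one_le_two_pow (n := s); omega)
    have h2 : s < Nat.clog 2 (2^s + 1) :=
      (Nat.lt_clog_iff_pow_lt (by norm_num)).mpr (by omega)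
    omega
  simp only [next_power_of_2, beq_iff_eq, hne, if_false, htn2, hclog]

theorem pvBlock_of_boundary (s : Nat)
    (hb : pvAltStep (pvTups (2^s - 1)).getLast? = ((2:Int)^s, 1)) :
    ∀ j, j ≤ 2^s → pvTups (2^s - 1 + j)
      = pvTups (2^s - 1) ++ (List.range j).map (fun k : Nat => ((2:Int)^s, (k:Int)+1)) := by
  intro j
  induction j with
  | zero => intro _; simp
  | succ j ih =>
    intro hj
    have hj' : j ≤ 2^s := by omega
    have hstep : pvTups (2^s - 1 + (j+1))
        = pvTups (2^s - 1 + j) ++ [pvAltStep (pvTups (2^s - 1 + j)).getLast?] := by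
      have : 2^s - 1 + (j+1) = (2^s - 1 + j) + 1 := by omega
      rw [this, pvTups]
    rw [hstep, ih hj', List.range_succ, List.map_append, List.map_cons, List.map_nil,
      ← List.append_assoc]
    congr 2
    cases j with
    | zero => simpa using hb
    | succ m =>
      have hlast : ((List.range (m+1)).map (fun k : Nat => ((2:Int)^s, (k:Int)+1))) ≠ [] := by simp
      rw [List.getLast?_append_of_ne_nil _ hlast]
      rw [List.getLast?_eq_getElem?]
      simp only [List.length_map, List.length_range]
      rw [List.getElem?_map]
      simp only [List.getElem?_range (by omega : m + 1 - 1 < m + 1)]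
      simp only [Option.map_some]
      have hne2 : ¬ (((m:Nat):Int) + 1 = (2:Int)^s) := by
        have h2 : ((m:Nat) + 2) ≤ 2^s := hj
        have h3 : ((m:Int) + 2) ≤ (2:Int)^s := by exact_mod_cast h2
        push_cast
        omega
      simp only [Nat.add_sub_cancel, pvAltStep, beq_iff_eq, if_neg hne2]
      push_cast
      ring_nf

theorem pvBoundary : ∀ s, 1 ≤ s → pvAltStep (pvTups (2^s - 1)).getLast? = ((2:Int)^s, 1) := by
  intro s
  induction s with
  | zero => intro h; omega
  | succ s ih =>
    intro _
    cases s with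
    | zero =>
      show pvAltStep (pvTups 1).getLast? = ((2:Int)^1, 1)
      have h01 : pvTups 1 = [(1,1)] := rfl
      decide
    | succ t =>
      have hfull := pvBlock_of_boundary (t+1) (ih (by omega)) (2^(t+1)) (le_refl _)
      have harith : 2^(t+1) - 1 + 2^(t+1) = 2^(t+2) - 1 := by
        have : 1 ≤ 2^(t+1) := Nat.one_le_two_pow
        rw [pow_succ 2 (t+1)]; omega
      rw [harith] at hfull
      rw [hfull]
      have hne : ((List.range (2^(t+1))).map (fun k : Nat => ((2:Int)^(t+1), (k:Int)+1))) ≠ [] := by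
        have : 1 ≤ 2^(t+1) := Nat.one_le_two_pow
        simp only [ne_eq, List.map_eq_nil_iff, List.range_eq_nil]
        omega
      rw [List.getLast?_append_of_ne_nil _ hne]
      have hpos : 0 < 2^(t+1) := Nat.two_pow_pos _
      rw [List.getLast?_eq_getElem?]
      simp only [List.length_map, List.length_range]
      rw [List.getElem?_map]
      simp only [List.getElem?_range (by omega : 2^(t+1) - 1 < 2^(t+1))]
      simp only [Option.map_some]
      have hval : ((2^(t+1) - 1 : Nat) : Int) + 1 = (2:Int)^(t+1) := by
        have hp : 1 ≤ 2^(t+1) := Nat.one_le_two_pow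
        rw [Nat.cast_sub hp]
        push_cast
        ring
      simp only [pvAltStep, hval, beq_self_eq_true, if_true]
      rw [pv_next_pow]

theorem pvBuild_eq : ∀ fuel s n, 1 ≤ s → n ≤ 2^s - 1 + fuel →
    ∃ L, n ≤ L ∧ pvBuild fuel (pvTups (2^s - 1)) ((2:Int)^s) n = pvTups L := by
  intro fuel
  induction fuel with
  | zero =>
    intro s n _ hn
    exact ⟨2^s - 1, by omega, rfl⟩
  | succ fuel ih =>
    intro s n hs hn
    by_cases h : (pvTups (2^s - 1)).length < n
    · have happ : pvTups (2^s - 1)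
          ++ (PySem.List.pyRange 1 ((2:Int)^s + 1) 1).map (fun k => ((2:Int)^s, k))
          = pvTups (2^(s+1) - 1) := by
        have hrange : PySem.List.pyRange 1 ((2:Int)^s + 1) 1
            = (List.range ((2:Int)^s + 1 - 1).toNat).map (fun k : Nat => (1:Int) + k) := by
          rw [PySem.List.pyRange_one]
        have htn : ((2:Int)^s + 1 - 1).toNat = 2^s := by
          rw [show ((2:Int)^s + 1 - 1) = ((2^s : Nat) : Int) by push_cast; ring]
          exact Int.toNat_natCast _
        rw [hrange, htn, List.map_map]
        have harith : 2^s - 1 + 2^s = 2^(s+1) - 1 := by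
          have : 1 ≤ 2^s := Nat.one_le_two_pow
          rw [pow_succ]; omega
        rw [← harith, pvBlock_of_boundary s (pvBoundary s hs) (2^s) (le_refl _)]
        congr 1
        apply List.map_congr_left
        intro k _
        simp [Function.comp]
        ring
      have hmul : (2:Int)^s * 2 = (2:Int)^(s+1) := by rw [pow_succ]
      have hstep : pvBuild (fuel+1) (pvTups (2^s - 1)) ((2:Int)^s) n
          = pvBuild fuel (pvTups (2^(s+1) - 1)) ((2:Int)^(s+1)) n := by
        rw [pvBuild]
        simp only [h, if_true, happ, hmul]
      rw [hstep]
      apply ih (s+1) n (by omega)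
      have h1 : 1 ≤ 2^s := Nat.one_le_two_pow
      have : 2^(s+1) = 2^s * 2 := by rw [pow_succ]
      omega
    · refine ⟨2^s - 1, ?_, ?_⟩
      · rw [pvTups_length] at h; omega
      · rw [pvBuild]; simp only [h, if_false]

-- ===== VERDICT (by name: the statement is the Claim_ definition above) =====
theorem generate_partition_sequence_spec : Claim_equal_generate_partition_sequence := by
  intro n _
  show generate_partition_sequence n = generate_partition_sequence_alt n
  unfold generate_partition_sequence generate_partition_sequence_alt
  rw [pvA_fold]
  obtain ⟨L, hL, hB⟩ := pvBuild_eq n.toNat 1 n.toNat (le_refl 1) (by omega)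
  have h1 : pvTups (2^1 - 1) = [(1,1)] := rfl
  have h2 : ((2:Int)^1) = 2 := by norm_num
  rw [h1, h2] at hB
  simp only [hB]
  apply List.map_congr_left
  intro i hi
  have hi' : i + 1 ≤ n.toNat := by simpa using Nat.succ_le_of_lt (List.mem_range.mp hi)
  rw [pvTups_take hL, pvTups_take hi']
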